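-- pv_equiv track=rewrite | github.com/LouRohan/AoC2019 | day04.py | doTwoMatching
-- ===== SOURCE A (Python) =====
-- def doTwoMatching(i):
--     test = str(i)
--     if len(test) != 6:
--         return False
--     idx = 0
--     run = 0
--     while idx < 5:
--         if test[idx] == test[idx+1]:
--             run += 1
--         else:
--             if run == 1:
--                 return True
--             run = 0
--         idx += 1
--
--     return run == 1
-- ===== SOURCE B (Python) =====
-- def doTwoMatching(i):
--     test = str(i)
--     if len(test) != 6:
--         return False
--     return 2 in runLengths(test)
--
--
-- def runLengths(s):
--     # recursive run-length encoding: length of each maximal run of equal chars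
--     if not s:
--         return []
--     n = 1
--     while n < len(s) and s[n] == s[0]:
--         n += 1
--     return [n] + runLengths(s[n:])
-- ===== Notes on version B (the rewrite author's own statement) =====
-- stated objective: alternative
-- what changed: Replaces A's incremental run-counter state machine with early return by a recursive run-length encoding of the digit string followed by a membership test for a run of length exactly 2.
import Mathlib
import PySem

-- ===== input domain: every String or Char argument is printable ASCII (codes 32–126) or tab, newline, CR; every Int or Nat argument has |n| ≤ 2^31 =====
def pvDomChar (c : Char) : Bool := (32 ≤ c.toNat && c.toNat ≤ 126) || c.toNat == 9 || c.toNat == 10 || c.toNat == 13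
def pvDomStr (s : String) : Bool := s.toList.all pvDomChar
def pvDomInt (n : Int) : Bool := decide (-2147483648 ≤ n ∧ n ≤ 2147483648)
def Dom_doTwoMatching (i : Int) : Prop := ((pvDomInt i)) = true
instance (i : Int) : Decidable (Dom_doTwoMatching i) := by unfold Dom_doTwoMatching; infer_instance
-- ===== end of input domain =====

-- B replaces A's incremental run-counter state machine (early return) by a recursive
-- run-length encoding of the digit string followed by a membership test for a run of length 2.


-- ===== PORT A =====
-- the 'while idx < 5' loop, with state (idx, run)
def doTwoMatchingLoop (test : List Char) (idx run : Nat) : Bool :=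
  if idx < 5 then
    if PySem.List.pyGet? test (idx : Int) == PySem.List.pyGet? test ((idx : Int) + 1) then
      doTwoMatchingLoop test (idx + 1) (run + 1)
    else if run == 1 then true
    else doTwoMatchingLoop test (idx + 1) 0
  else run == 1
termination_by 5 - idx

def doTwoMatching (i : Int) : Bool :=
  let test := (PySem.Int.toStr i).toList
  if test.length ≠ 6 then false
  else doTwoMatchingLoop test 0 0

-- ===== PORT B =====
-- the 'while n < len(s) and s[n] == s[0]' counter of Source B (n = 1 + samePrefix)
def samePrefix (c : Char) : List Char → Nat
  | [] => 0
  | d :: ds => if d == c then 1 + samePrefix c ds else 0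

-- recursive run-length encoding, as in Source B's runLengths
def runLengths : List Char → List Nat
  | [] => []
  | c :: rest =>
    let k := samePrefix c rest
    (1 + k) :: runLengths (rest.drop k)
termination_by l => l.length
decreasing_by simp [List.length_drop]

def doTwoMatching_alt (i : Int) : Bool :=
  let test := (PySem.Int.toStr i).toList
  if test.length ≠ 6 then false
  else (runLengths test).contains 2

-- ===== PRECONDITION & SPEC =====
def Spec_doTwoMatching (i : Int) (out : Bool) : Prop := out = doTwoMatching_alt i
instance (i : Int) (out : Bool) : Decidable (Spec_doTwoMatching i out) := by unfold Spec_doTwoMatching; infer_instance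

-- ===== CLAIM (what is proved, stated in full; the proofs are below) =====
def Claim_equal_doTwoMatching : Prop := ∀ (i : Int), Dom_doTwoMatching i → Spec_doTwoMatching i (doTwoMatching i)

-- ===== LEMMAS AND PROOFS =====
lemma runLengths_nil : runLengths [] = [] := by rw [runLengths]

lemma runLengths_cons (c : Char) (rest : List Char) :
    runLengths (c :: rest) =
      (1 + samePrefix c rest) :: runLengths (rest.drop (samePrefix c rest)) := by
  rw [runLengths]

set_option maxHeartbeats 2000000 in
lemma key (a b c d e f : Char) :
    doTwoMatchingLoop [a, b, c, d, e, f] 0 0 = (runLengths [a, b, c, d, e, f]).contains 2 := by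
  by_cases h1 : a = b <;> by_cases h2 : b = c <;> by_cases h3 : c = d <;>
      by_cases h4 : d = e <;> by_cases h5 : e = f <;> subst_vars <;>
    simp_all [doTwoMatchingLoop, PySem.List.pyGet?, PySem.List.pyIdx?] <;>
    simp_all [runLengths_cons, runLengths_nil, samePrefix] <;>
    (repeat' (split_ifs <;> simp_all [runLengths_cons, runLengths_nil, samePrefix]))

-- ===== VERDICT (by name: the statement is the Claim_ definition above) =====
theorem doTwoMatching_spec : Claim_equal_doTwoMatching := by
  intro i _
  unfold Spec_doTwoMatching doTwoMatching doTwoMatching_alt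
  rcases hl : (PySem.Int.toStr i).toList with _ | ⟨a, _ | ⟨b, _ | ⟨c, _ | ⟨d, _ | ⟨e, _ | ⟨f, _ | ⟨g, t⟩⟩⟩⟩⟩⟩⟩ <;>
    simp [key]
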